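-- pv_equiv track=rewrite | github.com/onurds/MTA_Project | Old2/bilstm_ner_re.py | _insert_markers
-- ===== SOURCE A (Python) =====
-- from typing import Dict, List, Optional, Tuple
--
-- ROUTE_START = "[ROUTE]"
--
-- ROUTE_END = "[/ROUTE]"
--
-- DIR_START = "[DIR]"
--
-- DIR_END = "[/DIR]"
--
-- def _insert_markers(
--     text: str,
--     route_spans: List[Dict],
--     direction_spans: List[Dict],
--     route_id: int,
--     direction_id: int
-- ) -> str:
--     """Insert entity markers around the target route and direction spans."""
--     r_span = next((s for s in route_spans if s["id"] == route_id), None)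
--     d_span = next((s for s in direction_spans if s["id"] == direction_id), None)
--     if not r_span or not d_span:
--         return text
--
--     inserts = [
--         (r_span["start"], ROUTE_START + " ", False),
--         (r_span["end"], " " + ROUTE_END, True),
--         (d_span["start"], DIR_START + " ", False),
--         (d_span["end"], " " + DIR_END, True),
--     ]
--     inserts.sort(key=lambda x: (-x[0], x[2]))
--
--     out = text
--     for pos, mark, _ in inserts:
--         out = out[:pos] + mark + out[pos:]
--     return out
-- ===== SOURCE B (Python) =====
-- ROUTE_START = "[ROUTE]"
-- ROUTE_END = "[/ROUTE]"
-- DIR_START = "[DIR]"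
-- DIR_END = "[/DIR]"
--
--
-- def _insert_markers(
--     text,
--     route_spans,
--     direction_spans,
--     route_id,
--     direction_id,
-- ):
--     """Insert entity markers around the target route and direction spans.
--
--     Single forward assembly: sort the four insertion events once (ascending
--     position, with a tie-break reproducing the right-to-left splice order)
--     and join the pieces, instead of four repeated full-string splices.
--     """
--     r_span = next((s for s in route_spans if s["id"] == route_id), None)
--     d_span = next((s for s in direction_spans if s["id"] == direction_id), None)
--     if not r_span or not d_span:
--         return text
--
--     # Listed in reverse priority so that the stable ascending sort puts
--     # colliding markers in exactly the order the right-to-left splicing yields.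
--     events = [
--         (d_span["end"], " " + DIR_END, True),
--         (d_span["start"], DIR_START + " ", False),
--         (r_span["end"], " " + ROUTE_END, True),
--         (r_span["start"], ROUTE_START + " ", False),
--     ]
--     events.sort(key=lambda e: (e[0], not e[2]))
--
--     pieces = []
--     prev = 0
--     for pos, mark, _is_end in events:
--         pieces.append(text[prev:pos])
--         pieces.append(mark)
--         prev = pos
--     pieces.append(text[prev:])
--     return "".join(pieces)
-- ===== Notes on version B (the rewrite author's own statement) =====
-- stated objective: alternative
-- what changed: Instead of sorting the four insertion events by descending position and splicing each marker into a progressively rebuilt copy of the whole string, B sorts them once ascending (events listed in reverse priority so the stable sort reproduces the splice tie-order) and assembles the result in a single forward pass joined at the end.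
import Mathlib
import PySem

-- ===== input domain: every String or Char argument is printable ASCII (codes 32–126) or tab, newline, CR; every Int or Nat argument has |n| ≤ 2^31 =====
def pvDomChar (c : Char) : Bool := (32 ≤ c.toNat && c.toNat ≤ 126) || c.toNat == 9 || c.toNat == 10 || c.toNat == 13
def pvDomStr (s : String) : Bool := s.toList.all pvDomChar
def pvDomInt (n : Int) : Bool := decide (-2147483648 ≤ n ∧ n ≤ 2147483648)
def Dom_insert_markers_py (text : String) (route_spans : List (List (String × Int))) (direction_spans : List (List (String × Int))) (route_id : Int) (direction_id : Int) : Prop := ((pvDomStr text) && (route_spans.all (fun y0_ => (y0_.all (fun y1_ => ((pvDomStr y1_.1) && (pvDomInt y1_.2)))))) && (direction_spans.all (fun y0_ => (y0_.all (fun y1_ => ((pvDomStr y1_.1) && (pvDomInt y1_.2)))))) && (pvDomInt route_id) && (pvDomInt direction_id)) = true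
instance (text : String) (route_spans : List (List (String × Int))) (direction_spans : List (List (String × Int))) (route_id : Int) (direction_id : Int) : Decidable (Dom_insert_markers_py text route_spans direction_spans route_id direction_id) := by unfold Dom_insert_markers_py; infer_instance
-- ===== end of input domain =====

-- B replaces A's four right-to-left full-string splices by one ascending sort plus a single
-- forward assembly joined once (objective: alternative decomposition, same exact result).

-- ===== PORT A =====
-- next((s for s in route_spans if s["id"] == route_id), None); a span missing the looked-up
-- key would make Python raise KeyError — those inputs are excluded by Pre_ below.
def pvFindSpanA (spans : List (List (String × Int))) (idv : Int) : Option (List (String × Int)) :=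
  spans.find? (fun s => PySem.Dict.get? (PySem.Dict.mk s) "id" == some idv)

-- out = out[:pos] + mark + out[pos:]
def pvSpliceA (out : String) (x : Int × String × Bool) : String :=
  PySem.Str.slice out none (some x.1) ++ x.2.1 ++ PySem.Str.slice out (some x.1) none

def insert_markers_py (text : String) (route_spans : List (List (String × Int))) (direction_spans : List (List (String × Int))) (route_id : Int) (direction_id : Int) : String :=
  let r_span := pvFindSpanA route_spans route_id
  let d_span := pvFindSpanA direction_spans direction_id
  match r_span, d_span with
  | some r, some d =>
    -- r_span["start"] etc.; a missing "start"/"end" key raises KeyError in Python (excluded by Pre_)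
    let inserts : List (Int × String × Bool) :=
      [(PySem.Dict.getD (PySem.Dict.mk r) "start" 0, "[ROUTE]" ++ " ", false),
       (PySem.Dict.getD (PySem.Dict.mk r) "end" 0, " " ++ "[/ROUTE]", true),
       (PySem.Dict.getD (PySem.Dict.mk d) "start" 0, "[DIR]" ++ " ", false),
       (PySem.Dict.getD (PySem.Dict.mk d) "end" 0, " " ++ "[/DIR]", true)]
    -- inserts.sort(key=lambda x: (-x[0], x[2]))
    (PySem.List.sorted2 inserts (fun x => -x.1) (fun x => x.2.2)).foldl pvSpliceA text
  | _, _ => text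

-- ===== PORT B =====
-- r_span/d_span looked up as in A (next(...) with default None), written inline
def insert_markers_py_alt (text : String) (route_spans : List (List (String × Int))) (direction_spans : List (List (String × Int))) (route_id : Int) (direction_id : Int) : String :=
  match route_spans.find? (fun s => PySem.Dict.get? (PySem.Dict.mk s) "id" == some route_id) with
  | none => text
  | some r =>
  match direction_spans.find? (fun s => PySem.Dict.get? (PySem.Dict.mk s) "id" == some direction_id) with
  | none => text
  | some d =>
    let events : List (Int × String × Bool) :=
      [(PySem.Dict.getD (PySem.Dict.mk d) "end" 0, " " ++ "[/DIR]", true),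
       (PySem.Dict.getD (PySem.Dict.mk d) "start" 0, "[DIR]" ++ " ", false),
       (PySem.Dict.getD (PySem.Dict.mk r) "end" 0, " " ++ "[/ROUTE]", true),
       (PySem.Dict.getD (PySem.Dict.mk r) "start" 0, "[ROUTE]" ++ " ", false)]
    -- events.sort(key=lambda e: (e[0], not e[2]))
    let ordered := PySem.List.sorted2 events (fun e => e.1) (fun e => !e.2.2)
    -- forward assembly: pieces.append(text[prev:pos]); pieces.append(mark); prev = pos
    let st := ordered.foldl
      (fun (acc : List String × Int) e =>
        (acc.1 ++ [PySem.Str.slice text (some acc.2) (some e.1), e.2.1], e.1)) ([], (0 : Int))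
    PySem.Str.join "" (st.1 ++ [PySem.Str.slice text (some st.2) none])

-- ===== PRECONDITION & SPEC =====
def pvSpanOKb (text : String) (s : List (String × Int)) : Bool :=
  (PySem.Dict.get? (PySem.Dict.mk s) "start").isSome &&
  (PySem.Dict.get? (PySem.Dict.mk s) "end").isSome &&
  decide (0 ≤ PySem.Dict.getD (PySem.Dict.mk s) "start" 0) &&
  decide (PySem.Dict.getD (PySem.Dict.mk s) "start" 0 ≤ PySem.Str.len text) &&
  decide (0 ≤ PySem.Dict.getD (PySem.Dict.mk s) "end" 0) &&
  decide (PySem.Dict.getD (PySem.Dict.mk s) "end" 0 ≤ PySem.Str.len text)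

def pvSpansOKb (text : String) (ro dopt : Option (List (String × Int))) : Bool :=
  match ro with
  | none => true
  | some r =>
    match dopt with
    | none => true
    | some d => pvSpanOKb text r && pvSpanOKb text d

-- Pre_ excludes (a) inputs where A raises KeyError (a span scanned by the id-lookup without an
-- "id" key, or a matched span without "start"/"end"), and (b) matched spans whose start/end lie
-- outside [0, len(text)]: there both A's and B's outputs are accidents of Python slice clamping
-- against differently grown strings and neither value is the one anyone would specify.
def Pre_insert_markers_py (text : String) (route_spans : List (List (String × Int))) (direction_spans : List (List (String × Int))) (route_id : Int) (direction_id : Int) : Prop :=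
  (∀ s ∈ route_spans.takeWhile (fun s => !(PySem.Dict.get? (PySem.Dict.mk s) "id" == some route_id)),
      (PySem.Dict.get? (PySem.Dict.mk s) "id").isSome = true) ∧
  (∀ s ∈ direction_spans.takeWhile (fun s => !(PySem.Dict.get? (PySem.Dict.mk s) "id" == some direction_id)),
      (PySem.Dict.get? (PySem.Dict.mk s) "id").isSome = true) ∧
  pvSpansOKb text
    (route_spans.find? (fun s => PySem.Dict.get? (PySem.Dict.mk s) "id" == some route_id))
    (direction_spans.find? (fun s => PySem.Dict.get? (PySem.Dict.mk s) "id" == some direction_id)) = true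

instance (text : String) (route_spans : List (List (String × Int))) (direction_spans : List (List (String × Int))) (route_id : Int) (direction_id : Int) : Decidable (Pre_insert_markers_py text route_spans direction_spans route_id direction_id) := by unfold Pre_insert_markers_py; infer_instance

def pvWitness_insert_markers_py : String × (List (List (String × Int))) × (List (List (String × Int))) × Int × Int :=
  ("the A train goes uptown", [[("id", 1), ("start", 4), ("end", 5)]], [[("id", 2), ("start", 17), ("end", 23)]], 1, 2)

def Spec_insert_markers_py (text : String) (route_spans : List (List (String × Int))) (direction_spans : List (List (String × Int))) (route_id : Int) (direction_id : Int) (out : String) : Prop := out = insert_markers_py_alt text route_spans direction_spans route_id direction_id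
instance (text : String) (route_spans : List (List (String × Int))) (direction_spans : List (List (String × Int))) (route_id : Int) (direction_id : Int) (out : String) : Decidable (Spec_insert_markers_py text route_spans direction_spans route_id direction_id out) := by unfold Spec_insert_markers_py; infer_instance

-- ===== CLAIM (what is proved, stated in full; the proofs are below) =====
def Claim_equal_insert_markers_py : Prop := ∀ (text : String) (route_spans : List (List (String × Int))) (direction_spans : List (List (String × Int))) (route_id : Int) (direction_id : Int), Dom_insert_markers_py text route_spans direction_spans route_id direction_id → Pre_insert_markers_py text route_spans direction_spans route_id direction_id → Spec_insert_markers_py text route_spans direction_spans route_id direction_id (insert_markers_py text route_spans direction_spans route_id direction_id)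

-- ===== LEMMAS AND PROOFS =====

theorem pvInsertBy_nil {α : Type} (b : α → α → Bool) (x : α) : PySem.List.insertBy b x [] = [x] := rfl
theorem pvInsertBy_cons {α : Type} (b : α → α → Bool) (x y : α) (ys : List α) :
    PySem.List.insertBy b x (y :: ys) = if b x y then x :: y :: ys else y :: PySem.List.insertBy b x ys := rfl

theorem pvCond1 (u v : Int) : (decide (u < v) || !decide (v < u)) = decide (u ≤ v) := by
  by_cases h : u < v <;> by_cases h2 : v < u <;> simp [h, h2] <;> omega

-- A's descending stable sort is the reverse of B's ascending stable sort of the reversed event list.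
set_option maxHeartbeats 4000000 in
theorem pvSortRev (p1 p2 p3 p4 : Int) (m1 m2 m3 m4 : String) :
  PySem.List.sorted2 [(p1,m1,false),(p2,m2,true),(p3,m3,false),(p4,m4,true)] (fun x => -x.1) (fun x => x.2.2)
  = (PySem.List.sorted2 [(p4,m4,true),(p3,m3,false),(p2,m2,true),(p1,m1,false)] (fun e => e.1) (fun e => !e.2.2)).reverse := by
  simp only [PySem.List.sorted2, List.foldl, pvInsertBy_nil, pvInsertBy_cons]
  norm_num [pvCond1, Bool.lt_iff]
  repeat' (split_ifs <;> (try (norm_num [pvInsertBy_nil, pvInsertBy_cons, pvCond1, Bool.lt_iff])))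
  all_goals first | rfl | omega

-- the first key of an ascending sorted2 result is nondecreasing
theorem pvInsertBy_pairwise_le {α : Type} (k1 : α → Int) (before : α → α → Bool)
    (hT : ∀ a b, before a b = true → k1 a ≤ k1 b) (hF : ∀ a b, before a b = false → k1 b ≤ k1 a)
    (x : α) (ys : List α) (h : ys.Pairwise (fun a b => k1 a ≤ k1 b)) :
    (PySem.List.insertBy before x ys).Pairwise (fun a b => k1 a ≤ k1 b) := by
  induction ys with
  | nil => simp [pvInsertBy_nil]
  | cons y ys ih =>
    rw [pvInsertBy_cons]
    rw [List.pairwise_cons] at h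
    obtain ⟨hy, hys⟩ := h
    by_cases hb : before x y = true
    · simp only [hb, if_true]
      refine List.Pairwise.cons ?_ (List.Pairwise.cons hy hys)
      intro z hz
      rcases List.mem_cons.mp hz with rfl | hz
      · exact hT _ _ hb
      · exact le_trans (hT _ _ hb) (hy z hz)
    · simp only [hb]
      refine List.Pairwise.cons ?_ (ih hys)
      intro z hz
      rcases (PySem.List.mem_insertBy before x z ys).mp hz with rfl | hz
      · exact hF _ _ (by simpa using hb)
      · exact hy z hz

theorem pvSorted2_pairwise {α κ₂ : Type} [LT κ₂] [DecidableLT κ₂] (xs : List α) (k1 : α → Int) (k2 : α → κ₂) :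
    (PySem.List.sorted2 xs k1 k2).Pairwise (fun a b => k1 a ≤ k1 b) := by
  rw [PySem.List.sorted2]
  generalize hacc : ([] : List α) = acc
  have hacc' : acc.Pairwise (fun a b => k1 a ≤ k1 b) := by rw [← hacc]; exact List.Pairwise.nil
  clear hacc
  induction xs generalizing acc with
  | nil => simpa using hacc'
  | cons x t ih =>
    simp only [List.foldl]
    refine ih _ ?_
    refine pvInsertBy_pairwise_le k1 _ ?_ ?_ x acc hacc'
    · intro a b h
      rw [if_neg (by simp)] at h
      by_cases h1 : k1 a < k1 b
      · exact le_of_lt h1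
      · simp only [h1, decide_false, Bool.false_or, Bool.and_eq_true, Bool.not_eq_true',
          decide_eq_false_iff_not, not_lt] at h
        exact h.1
    · intro a b h
      rw [if_neg (by simp)] at h
      simp only [Bool.or_eq_false_iff, decide_eq_false_iff_not, not_lt] at h
      exact h.1

-- forward assembly of a position-sorted event list over the ORIGINAL text
def pvAsm (t : List Char) : Nat → List (Nat × List Char) → List Char
  | prev, [] => t.drop prev
  | prev, (p, m) :: rest => (t.take p).drop prev ++ m ++ pvAsm t p rest

theorem pvDropSplit {α : Type} (u : List α) (prev p : Nat) (h1 : prev ≤ p) (h2 : p ≤ u.length) :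
    u.drop prev = (u.take p).drop prev ++ u.drop p := by
  conv_lhs => rw [← List.take_append_drop p u]
  rw [List.drop_append]
  have : prev - (List.take p u).length = 0 := by
    simp [List.length_take]; omega
  rw [this, List.drop_zero]

theorem pvAsm_split (t : List Char) (L : List (Nat × List Char)) (prev p : Nat)
    (h1 : prev ≤ p) (h2 : p ≤ t.length) (h3 : ∀ x ∈ L, p ≤ x.1) (h4 : ∀ x ∈ L, x.1 ≤ t.length) :
    pvAsm t prev L = (t.take p).drop prev ++ pvAsm t p L := by
  cases L with
  | nil => simpa [pvAsm] using pvDropSplit t prev p h1 h2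
  | cons x L' =>
    obtain ⟨q, m⟩ := x
    have hpq : p ≤ q := h3 (q, m) (by simp)
    have hql : q ≤ t.length := h4 (q, m) (by simp)
    simp only [pvAsm]
    have : (t.take q).drop prev = (t.take p).drop prev ++ (t.take q).drop p := by
      have h5 : t.take p = (t.take q).take p := by rw [List.take_take, min_eq_left hpq]
      rw [h5]
      exact pvDropSplit (t.take q) prev p h1 (by simp [List.length_take]; omega)
    rw [this]
    simp [List.append_assoc]

theorem pvCore (t : List Char) (L : List (Nat × List Char))
    (hp : L.Pairwise (fun a b => a.1 ≤ b.1)) (hb : ∀ x ∈ L, x.1 ≤ t.length) :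
    (L.reverse).foldl (fun out x => out.take x.1 ++ x.2 ++ out.drop x.1) t = pvAsm t 0 L := by
  induction L with
  | nil => simp [pvAsm]
  | cons x rest ih =>
    rw [List.pairwise_cons] at hp
    obtain ⟨hx, hrest⟩ := hp
    have hxl : x.1 ≤ t.length := hb x (by simp)
    have hbrest : ∀ y ∈ rest, y.1 ≤ t.length := fun y hy => hb y (by simp [hy])
    rw [List.reverse_cons, List.foldl_append, ih hrest hbrest]
    simp only [List.foldl]
    have hsplit : pvAsm t 0 rest = t.take x.1 ++ pvAsm t x.1 rest := by
      have := pvAsm_split t rest 0 x.1 (Nat.zero_le _) hxl hx hbrest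
      simpa using this
    obtain ⟨p, m⟩ := x
    simp only at hsplit hxl ⊢
    rw [hsplit]
    have hlen : (t.take p).length = p := by simp [List.length_take]; omega
    rw [List.take_left' hlen, List.drop_left' hlen]
    simp [pvAsm]

-- slice bridges (string level, nonnegative indices)
theorem pvSliceTo (s : String) (i : Int) (h : 0 ≤ i) :
    (PySem.Str.slice s none (some i)).toList = s.toList.take i.toNat := by
  rw [PySem.Str.toList_slice, PySem.Chars.slice_eq_listSlice, PySem.List.slice_to _ h]

theorem pvSliceFrom (s : String) (i : Int) (h : 0 ≤ i) :
    (PySem.Str.slice s (some i) none).toList = s.toList.drop i.toNat := by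
  rw [PySem.Str.toList_slice, PySem.Chars.slice_eq_listSlice, PySem.List.slice_from _ h]

theorem pvSliceAB (s : String) (a b : Int) (ha : 0 ≤ a) (hb : 0 ≤ b) :
    (PySem.Str.slice s (some a) (some b)).toList = (s.toList.take b.toNat).drop a.toNat := by
  have h := PySem.List.slice_natCast s.toList a.toNat b.toNat
  rw [Int.toNat_of_nonneg ha, Int.toNat_of_nonneg hb] at h
  rw [PySem.Str.toList_slice, PySem.Chars.slice_eq_listSlice, h, ← List.drop_take]

-- A's splice loop, moved to the character level
theorem pvFoldA_toList (l : List (Int × String × Bool)) :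
    ∀ s : String, (∀ x ∈ l, 0 ≤ x.1) →
    (l.foldl pvSpliceA s).toList
      = l.foldl (fun cs (x : Int × String × Bool) =>
          cs.take x.1.toNat ++ x.2.1.toList ++ cs.drop x.1.toNat) s.toList := by
  induction l with
  | nil => intro s _; simp
  | cons x t ih =>
    intro s hx
    simp only [List.foldl]
    have hstep : (pvSpliceA s x).toList
        = s.toList.take x.1.toNat ++ x.2.1.toList ++ s.toList.drop x.1.toNat := by
      simp only [pvSpliceA, String.toList_append]
      rw [pvSliceTo _ _ (hx x (by simp)), pvSliceFrom _ _ (hx x (by simp))]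
    rw [ih _ (fun y hy => hx y (by simp [hy])), hstep]

theorem pvJoinEmpty (parts : List String) :
    (PySem.Str.join "" parts).toList = (parts.map String.toList).flatten := by
  rw [PySem.Str.toList_join]
  show PySem.Chars.join [] (parts.map String.toList) = _
  induction parts with
  | nil => simp [PySem.Chars.join_nil]
  | cons p t ih =>
    cases t with
    | nil => simp [PySem.Chars.join_singleton]
    | cons q t' =>
      simp only [List.map_cons] at ih ⊢
      rw [PySem.Chars.join_cons_cons]
      simp [ih]

-- B's assembly loop, moved to the character level
theorem pvFoldB (text : String) (l : List (Int × String × Bool)) :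
    ∀ (acc : List String) (prev : Int), 0 ≤ prev → (∀ e ∈ l, 0 ≤ e.1) →
    (((l.foldl (fun (acc : List String × Int) (e : Int × String × Bool) =>
          (acc.1 ++ [PySem.Str.slice text (some acc.2) (some e.1), e.2.1], e.1)) (acc, prev)).1
        ++ [PySem.Str.slice text
              (some ((l.foldl (fun (acc : List String × Int) (e : Int × String × Bool) =>
                (acc.1 ++ [PySem.Str.slice text (some acc.2) (some e.1), e.2.1], e.1)) (acc, prev)).2))
              none]).map String.toList).flatten
      = ((acc.map String.toList).flatten)
          ++ pvAsm text.toList prev.toNat (l.map (fun e => (e.1.toNat, e.2.1.toList))) := by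
  induction l with
  | nil =>
    intro acc prev hprev _
    simp [pvAsm, pvSliceFrom _ _ hprev]
  | cons e t ih =>
    intro acc prev hprev hpos
    have he : 0 ≤ e.1 := hpos e (by simp)
    simp only [List.foldl]
    rw [ih _ _ he (fun y hy => hpos y (by simp [hy]))]
    simp only [List.map_cons, pvAsm, List.map_append, List.flatten_append]
    rw [pvSliceAB text prev e.1 hprev he]
    simp [List.append_assoc]

-- ===== VERDICT (by name: the statement is the Claim_ definition above) =====
theorem insert_markers_py_spec : Claim_equal_insert_markers_py := by
  unfold Claim_equal_insert_markers_py
  intro text rs ds ri di _hdom hpre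
  obtain ⟨-, -, hok⟩ := hpre
  unfold Spec_insert_markers_py insert_markers_py insert_markers_py_alt pvFindSpanA
  have hokA := hok
  cases hr : rs.find? (fun s => PySem.Dict.get? (PySem.Dict.mk s) "id" == some ri) with
  | none => cases hd : ds.find? (fun s => PySem.Dict.get? (PySem.Dict.mk s) "id" == some di) <;> rfl
  | some r =>
    cases hd : ds.find? (fun s => PySem.Dict.get? (PySem.Dict.mk s) "id" == some di) with
    | none => rfl
    | some d =>
      rw [hr, hd] at hokA
      simp only [pvSpansOKb, pvSpanOKb, Bool.and_eq_true, decide_eq_true_eq,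
        PySem.Str.len_eq] at hokA
      obtain ⟨⟨⟨⟨⟨⟨-, -⟩, h1⟩, h2⟩, h3⟩, h4⟩, ⟨⟨⟨⟨⟨-, -⟩, h5⟩, h6⟩, h7⟩, h8⟩⟩ := hokA
      dsimp only
      rw [pvSortRev]
      rw [← String.toList_inj]
      -- abbreviations
      set pS := PySem.Dict.getD (PySem.Dict.mk r) "start" 0 with hpS
      set pE := PySem.Dict.getD (PySem.Dict.mk r) "end" 0 with hpE
      set dS := PySem.Dict.getD (PySem.Dict.mk d) "start" 0 with hdS
      set dE := PySem.Dict.getD (PySem.Dict.mk d) "end" 0 with hdE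
      set E : List (Int × String × Bool) :=
        [(dE, " " ++ "[/DIR]", true), (dS, "[DIR]" ++ " ", false),
         (pE, " " ++ "[/ROUTE]", true), (pS, "[ROUTE]" ++ " ", false)] with hE
      set O := PySem.List.sorted2 E (fun e => e.1) (fun e => !e.2.2) with hO
      have hmemO : ∀ x ∈ O, x ∈ E := fun x hx =>
        ((PySem.List.sorted2_perm E (fun e => e.1) (fun e => !e.2.2) false).mem_iff).mp hx
      have hposE : ∀ x ∈ E, 0 ≤ x.1 := by
        intro x hx
        simp only [hE, List.mem_cons, List.not_mem_nil, or_false] at hx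
        rcases hx with rfl | rfl | rfl | rfl
        · exact h7
        · exact h5
        · exact h3
        · exact h1
      have hbndE : ∀ x ∈ E, x.1.toNat ≤ text.toList.length := by
        intro x hx
        simp only [hE, List.mem_cons, List.not_mem_nil, or_false] at hx
        rcases hx with rfl | rfl | rfl | rfl <;> dsimp only <;> omega
      have hposO : ∀ x ∈ O, 0 ≤ x.1 := fun x hx => hposE x (hmemO x hx)
      have hbndO : ∀ x ∈ O, x.1.toNat ≤ text.toList.length := fun x hx => hbndE x (hmemO x hx)
      -- A side
      rw [pvFoldA_toList O.reverse text (fun x hx => hposO x (List.mem_reverse.mp hx))]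
      have hA : O.reverse.foldl
          (fun cs (x : Int × String × Bool) =>
            cs.take x.1.toNat ++ x.2.1.toList ++ cs.drop x.1.toNat) text.toList
          = pvAsm text.toList 0 (O.map (fun e => (e.1.toNat, e.2.1.toList))) := by
        rw [← pvCore text.toList (O.map (fun e => (e.1.toNat, e.2.1.toList)))
              (List.Pairwise.map _ (fun a b hab => Int.toNat_le_toNat hab)
                (pvSorted2_pairwise E (fun e => e.1) (fun e => !e.2.2)))
              (by intro x hx
                  rcases List.mem_map.mp hx with ⟨e, he, rfl⟩
                  exact hbndO e he),
            ← List.map_reverse, List.foldl_map]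
      rw [hA]
      -- B side
      rw [pvJoinEmpty]
      rw [pvFoldB text O [] 0 le_rfl hposO]
      simp
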